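-- pv_equiv track=rewrite | github.com/SebastianParzych/Covid-Scraper | scraper.py | xAxis_data
-- ===== SOURCE A (Python) =====
-- def xAxis_data(script):
--     xname = '["' + script.split('categories: ["', 1)[1]
--     xname = xname.split(']', 1)[0] + ']'
--     xAxis = []
--     string = ""
--     single_date = False
--     for char in xname: # converting single string to list of strings ( dates ).
--         if char == '"':
--             if single_date == True:
--                 xAxis.append(string)
--             single_date= not single_date
--             string=""
--             continue
--         if single_date == True:
--             string += char
--     return  xAxis
-- ===== SOURCE B (Python) =====
-- def xAxis_data(script):
--     xname = '["' + script.split('categories: ["', 1)[1]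
--     xname = xname.split(']', 1)[0] + ']'
--     parts = xname.split('"')
--     return [p for i, p in enumerate(parts[:-1]) if i % 2 == 1]
-- ===== Notes on version B (the rewrite author's own statement) =====
-- stated objective: idiomatic
-- what changed: Replaces A's char-by-char quote-toggle state machine (mutable string/flag accumulators) with a single split on '"' followed by an odd-index comprehension over the parts minus the last (unclosed) segment.
import Mathlib
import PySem

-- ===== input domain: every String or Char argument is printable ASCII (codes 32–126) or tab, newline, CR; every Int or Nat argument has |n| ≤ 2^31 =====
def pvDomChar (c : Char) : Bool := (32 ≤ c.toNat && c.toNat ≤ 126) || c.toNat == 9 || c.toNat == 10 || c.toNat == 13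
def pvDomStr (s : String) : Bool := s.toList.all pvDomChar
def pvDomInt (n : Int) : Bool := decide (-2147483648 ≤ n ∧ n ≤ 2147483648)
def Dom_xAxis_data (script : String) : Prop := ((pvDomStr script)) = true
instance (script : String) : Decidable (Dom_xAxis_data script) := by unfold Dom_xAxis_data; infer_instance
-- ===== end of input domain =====

-- B replaces A's char-by-char quote-toggle state machine by split-on-quote plus an
-- odd-index comprehension (idiomatic, same cost); strings are handled as char lists (exact on Dom).

-- ===== PORT A =====
def xAxis_data (script : String) : List String :=
  -- xname = '["' + script.split('categories: ["', 1)[1]   ([1] raises IndexError when absent: Pre_)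
  match PySem.List.pyGet? (PySem.Chars.splitOnMax script.toList ("categories: [\"".toList) 1) 1 with
  | none => []  -- unreachable under Pre_xAxis_data (Python raises IndexError here)
  | some tail0 =>
    -- xname = xname.split(']', 1)[0] + ']'   (split never returns [], so [0] is headD)
    let xname : List Char :=
      (PySem.Chars.splitOnMax ("[\"".toList ++ tail0) [']'] 1).headD [] ++ [']']
    -- the for-loop over xname with state (xAxis, string, single_date)
    let res := xname.foldl
      (fun (st : List (List Char) × List Char × Bool) char =>
        if char = '"' then
          (if st.2.2 = true then st.1 ++ [st.2.1] else st.1, [], !st.2.2)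
        else
          (st.1, if st.2.2 = true then st.2.1 ++ [char] else st.2.1, st.2.2))
      ([], [], false)
    res.1.map String.ofList

-- ===== PORT B =====
def xAxis_data_alt (script : String) : List String :=
  match PySem.List.pyGet? (PySem.Chars.splitOnMax script.toList ("categories: [\"".toList) 1) 1 with
  | none => []  -- unreachable under Pre_xAxis_data (Python raises IndexError here)
  | some tail0 =>
    let xname : List Char :=
      (PySem.Chars.splitOnMax ("[\"".toList ++ tail0) [']'] 1).headD [] ++ [']']
    -- parts = xname.split('"'); [p for i, p in enumerate(parts[:-1]) if i % 2 == 1]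
    let parts := PySem.Chars.splitOn xname ['"']
    ((PySem.List.enumerate (PySem.List.slice parts none (some (-1))) 0).filter
        (fun ip => PySem.Int.mod ip.1 2 == 1)).map (fun ip => String.ofList ip.2)

-- ===== PRECONDITION & SPEC =====
-- Pre_ excludes exactly the inputs where A raises IndexError: 'categories: ["' does not occur in script.
def Pre_xAxis_data (script : String) : Prop := PySem.Str.isIn "categories: [\"" script = true
instance (script : String) : Decidable (Pre_xAxis_data script) := by unfold Pre_xAxis_data; infer_instance
def pvWitness_xAxis_data : String := "categories: [\"2020-01-01\",\"2020-01-02\"]"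
def Spec_xAxis_data (script : String) (out : List String) : Prop := out = xAxis_data_alt script
instance (script : String) (out : List String) : Decidable (Spec_xAxis_data script out) := by unfold Spec_xAxis_data; infer_instance

-- ===== CLAIM (what is proved, stated in full; the proofs are below) =====
def Claim_equal_xAxis_data : Prop := ∀ (script : String), Dom_xAxis_data script → Pre_xAxis_data script → Spec_xAxis_data script (xAxis_data script)

-- ===== LEMMAS AND PROOFS =====

-- A's loop body, named for the proofs
def stepA (st : List (List Char) × List Char × Bool) (char : Char) :
    List (List Char) × List Char × Bool :=
  if char = '"' then
    (if st.2.2 = true then st.1 ++ [st.2.1] else st.1, [], !st.2.2)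
  else
    (st.1, if st.2.2 = true then st.2.1 ++ [char] else st.2.1, st.2.2)

-- split on a single character, as a left-to-right structural recursion
def mySplit (cs : List Char) : List (List Char) :=
  match cs with
  | [] => [[]]
  | c :: rest => if c = '"' then [] :: mySplit rest else (mySplit rest).modifyHead (c :: ·)

lemma mySplit_ne_nil (cs : List Char) : mySplit cs ≠ [] := by
  induction cs with
  | nil => simp [mySplit]
  | cons c rest ih =>
    simp only [mySplit]
    split
    · simp
    · cases h : mySplit rest with
      | nil => exact absurd h ih
      | cons p ps => simp [List.modifyHead]

lemma splitOn_go_spec (fuel : Nat) : ∀ (l cur : List Char) (acc : List (List Char)),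
    l.length ≤ fuel →
    PySem.Chars.splitOn.go ['"'] fuel l cur acc
      = acc.reverse ++ (mySplit l).modifyHead (cur.reverse ++ ·) := by
  induction fuel with
  | zero =>
    intro l cur acc hl
    have : l = [] := by cases l <;> simp_all
    subst this
    simp [PySem.Chars.splitOn.go, mySplit]
  | succ fuel ih =>
    intro l cur acc hl
    cases l with
    | nil => simp [PySem.Chars.splitOn.go, mySplit]
    | cons c rest =>
      simp only [List.length_cons] at hl
      by_cases hc : c = '"'
      · subst hc
        have hpre : List.isPrefixOf ['"'] ('"' :: rest) = true := by
          simp [List.isPrefixOf]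
        simp only [PySem.Chars.splitOn.go, hpre, if_true, List.length_cons, List.length_nil,
          List.drop_succ_cons, List.drop_zero]
        rw [ih rest [] _ (by omega)]
        cases h : mySplit rest with
        | nil => exact absurd h (mySplit_ne_nil rest)
        | cons p ps =>
          simp [mySplit, h, List.modifyHead]
      · have hpre : List.isPrefixOf ['"'] (c :: rest) = false := by
          simp [List.isPrefixOf]
          exact fun h => absurd h.symm hc
        simp only [PySem.Chars.splitOn.go, hpre, Bool.false_eq_true, if_false]
        rw [ih rest (c :: cur) acc (by omega)]
        cases h : mySplit rest with
        | nil => exact absurd h (mySplit_ne_nil rest)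
        | cons p ps =>
          simp [mySplit, hc, h, List.modifyHead]

lemma splitOn_eq_mySplit (cs : List Char) :
    PySem.Chars.splitOn cs ['"'] = mySplit cs := by
  unfold PySem.Chars.splitOn
  rw [splitOn_go_spec (cs.length + 1) cs [] [] (by omega)]
  cases h : mySplit cs with
  | nil => exact absurd h (mySplit_ne_nil cs)
  | cons p ps => simp [List.modifyHead]

-- the elements of the parts list that a completed quote pair encloses
def odds : List (List Char) → List (List Char)
  | [] => []
  | [_] => []
  | _ :: p :: rest => if rest.isEmpty then [] else p :: odds rest

def oddsT (s : List Char) : List (List Char) → List (List Char)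
  | [] => []
  | p :: rest => if rest.isEmpty then [] else (s ++ p) :: odds rest

lemma stepA_quote (ax : List (List Char)) (s : List Char) (b : Bool) :
    stepA (ax, s, b) '"' = (if b then ax ++ [s] else ax, [], !b) := by
  cases b <;> simp [stepA]

lemma stepA_other (ax : List (List Char)) (s : List Char) (b : Bool) {c : Char}
    (hc : c ≠ '"') : stepA (ax, s, b) c = (ax, if b then s ++ [c] else s, b) := by
  cases b <;> simp [stepA, hc]

lemma machine_spec (cs : List Char) : ∀ (ax : List (List Char)) (s : List Char),
    ((cs.foldl stepA (ax, s, false)).1 = ax ++ odds (mySplit cs))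
    ∧ ((cs.foldl stepA (ax, s, true)).1 = ax ++ oddsT s (mySplit cs)) := by
  induction cs with
  | nil =>
    intro ax s
    constructor
    · simp [odds, mySplit]
    · simp [oddsT, mySplit]
  | cons c rest ih =>
    intro ax s
    constructor
    · -- state false
      simp only [List.foldl_cons]
      by_cases hc : c = '"'
      · subst hc
        rw [stepA_quote]
        simp only [Bool.not_false, if_neg (by simp : ¬ (false = true))]
        rw [(ih ax []).2]
        simp only [mySplit]
        cases h : mySplit rest with
        | nil => exact absurd h (mySplit_ne_nil rest)
        | cons p ps => simp [odds, oddsT]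
      · rw [stepA_other ax s false hc]
        simp only [if_neg (by simp : ¬ (false = true))]
        rw [(ih ax s).1]
        simp only [mySplit, if_neg hc]
        cases h : mySplit rest with
        | nil => exact absurd h (mySplit_ne_nil rest)
        | cons p ps =>
          cases ps with
          | nil => simp [odds, List.modifyHead]
          | cons q qs => simp [odds, List.modifyHead]
    · -- state true
      simp only [List.foldl_cons]
      by_cases hc : c = '"'
      · subst hc
        rw [stepA_quote]
        simp only [Bool.not_true, reduceIte]
        rw [(ih (ax ++ [s]) []).1]
        simp only [mySplit]
        have h := mySplit_ne_nil rest
        simp [oddsT, List.isEmpty_iff, h]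
      · rw [stepA_other ax s true hc]
        simp only [reduceIte]
        rw [(ih ax (s ++ [c])).2]
        simp only [mySplit, if_neg hc]
        cases h : mySplit rest with
        | nil => exact absurd h (mySplit_ne_nil rest)
        | cons p ps =>
          cases ps with
          | nil => simp [oddsT, List.modifyHead]
          | cons q qs => simp [oddsT, List.modifyHead]

lemma odds_eq_filter (parts : List (List Char)) : ∀ (m : Nat),
    ((PySem.List.enumerate parts.dropLast (2 * (m : Int))).filter
        (fun ip => PySem.Int.mod ip.1 2 == 1)).map (fun ip => ip.2)
      = odds parts := by
  induction parts using odds.induct with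
  | case1 =>
    intro m; simp [odds]
  | case2 p =>
    intro m; simp [odds]
  | case3 p0 p1 rest hre =>
    intro m
    have : rest = [] := by simpa [List.isEmpty_iff] using hre
    subst this
    simp [odds, PySem.List.enumerate, PySem.Int.mod]
  | case4 p0 p1 rest hre ih =>
    intro m
    have hne : rest ≠ [] := by simpa [List.isEmpty_iff] using hre
    have hd : (p0 :: p1 :: rest).dropLast = p0 :: p1 :: rest.dropLast := by
      cases rest with
      | nil => exact absurd rfl hne
      | cons r rs => simp [List.dropLast]
    rw [hd]
    simp only [PySem.List.enumerate, List.filter_cons]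
    have h0 : (PySem.Int.mod (2 * (m : Int)) 2 == 1) = false := by
      simp [PySem.Int.mod]
    have h1 : (PySem.Int.mod (2 * (m : Int) + 1) 2 == 1) = true := by
      simp [PySem.Int.mod]
    rw [h0, h1]
    rw [if_neg (by simp), if_pos rfl]
    have h2 : (2 : Int) * (m : Int) + 1 + 1 = 2 * ((m + 1 : Nat) : Int) := by push_cast; ring
    rw [List.map_cons, h2, ih (m + 1)]
    simp [odds, hre]

lemma core (cs : List Char) :
    ((cs.foldl stepA ([], [], false)).1).map String.ofList
    = ((PySem.List.enumerate (PySem.List.slice (PySem.Chars.splitOn cs ['"']) none (some (-1))) 0).filter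
        (fun ip => PySem.Int.mod ip.1 2 == 1)).map (fun ip => String.ofList ip.2) := by
  rw [(machine_spec cs [] []).1, PySem.List.slice_to_neg_one, splitOn_eq_mySplit]
  have h := odds_eq_filter (mySplit cs) 0
  simp only [Nat.cast_zero, mul_zero] at h
  rw [← h]
  simp [List.map_map, Function.comp]

-- ===== VERDICT (by name: the statement is the Claim_ definition above) =====
theorem xAxis_data_spec : Claim_equal_xAxis_data := by
  intro script _ _
  unfold Spec_xAxis_data xAxis_data xAxis_data_alt
  cases h : PySem.List.pyGet? (PySem.Chars.splitOnMax script.toList ("categories: [\"".toList) 1) 1 with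
  | none => rfl
  | some tail0 => exact core _
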